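-- pv_equiv track=rewrite | github.com/akshaypulla/deal_room_S2P | server/scenarios.py | expand_targets
-- ===== SOURCE A (Python) =====
-- from typing import Dict, List
--
-- LEGACY_TARGET_ALIASES = {
--     "cfo": ["finance"],
--     "cto": ["technical"],
--     "legal": ["legal_compliance"],
--     "procurement": ["procurement"],
--     "ops": ["operations"],
--     "cto_cfo": ["technical", "finance"],
--     "legal_procurement": ["legal_compliance", "procurement"],
-- }
--
-- def expand_targets(target: str, available_ids: List[str]) -> List[str]:
--     if not target:
--         return []
--     lowered = target.lower().strip()
--     if lowered == "all":
--         return list(available_ids)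
--     if lowered in LEGACY_TARGET_ALIASES:
--         return [item for item in LEGACY_TARGET_ALIASES[lowered] if item in available_ids]
--     raw_parts = [part.strip() for part in target.split(",") if part.strip()]
--     normalized = []
--     for part in raw_parts:
--         part_lower = part.lower()
--         if part_lower in LEGACY_TARGET_ALIASES:
--             normalized.extend(
--                 [item for item in LEGACY_TARGET_ALIASES[part_lower] if item in available_ids]
--             )
--         elif part_lower in available_ids:
--             normalized.append(part_lower)
--     return list(dict.fromkeys(normalized))
-- ===== SOURCE B (Python) =====
-- from typing import Dict, List
--
-- LEGACY_TARGET_ALIASES = {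
--     "cfo": ["finance"],
--     "cto": ["technical"],
--     "legal": ["legal_compliance"],
--     "procurement": ["procurement"],
--     "ops": ["operations"],
--     "cto_cfo": ["technical", "finance"],
--     "legal_procurement": ["legal_compliance", "procurement"],
-- }
--
-- def expand_targets(target: str, available_ids: List[str]) -> List[str]:
--     if not target:
--         return []
--     if target.lower().strip() == "all":
--         return list(available_ids)
--     # flat expansion of every comma token (alias -> its expansion, else the token itself)
--     cand = [item
--             for part in target.split(",")
--             if part.strip()
--             for item in LEGACY_TARGET_ALIASES.get(part.strip().lower(),
--                                                   [part.strip().lower()])]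
--     # select by set algebra and recover first-occurrence order by sorting on first index
--     wanted = set(cand) & set(available_ids)
--     return sorted(wanted, key=cand.index)
-- ===== Notes on version B (the rewrite author's own statement) =====
-- stated objective: alternative
-- what changed: B replaces A's branchy accumulate-then-dedup loop (availability filtered inside each branch, dict.fromkeys at the end) by set algebra: one comprehension flat-expands all tokens, the result set is computed as set(candidates) & set(available_ids), and first-occurrence order is recovered by sorting that set on each element's first index in the candidate list; the whole-string alias branch is dropped as redundant.
import Mathlib
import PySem

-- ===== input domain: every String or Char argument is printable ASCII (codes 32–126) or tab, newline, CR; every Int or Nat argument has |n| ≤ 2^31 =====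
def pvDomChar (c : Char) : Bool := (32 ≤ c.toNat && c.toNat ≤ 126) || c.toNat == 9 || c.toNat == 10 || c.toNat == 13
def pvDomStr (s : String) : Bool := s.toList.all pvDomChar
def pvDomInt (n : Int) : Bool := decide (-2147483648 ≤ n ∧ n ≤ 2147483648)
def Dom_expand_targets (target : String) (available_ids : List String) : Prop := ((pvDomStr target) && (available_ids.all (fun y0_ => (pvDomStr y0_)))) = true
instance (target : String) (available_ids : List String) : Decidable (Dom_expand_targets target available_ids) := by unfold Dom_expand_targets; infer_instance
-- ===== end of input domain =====

-- B selects by set algebra: flat-expand all tokens with a comprehension, intersect set(candidates) with set(available_ids), and recover first-occurrence order by sorting on first index in the candidate list; alternative decomposition, same behaviour.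


-- ===== PORT A =====
-- module-level constant LEGACY_TARGET_ALIASES
def legacyAliases : PySem.Dict String (List String) :=
  PySem.Dict.ofList
    [("cfo", ["finance"]), ("cto", ["technical"]), ("legal", ["legal_compliance"]),
     ("procurement", ["procurement"]), ("ops", ["operations"]),
     ("cto_cfo", ["technical", "finance"]),
     ("legal_procurement", ["legal_compliance", "procurement"])]

def expand_targets (target : String) (available_ids : List String) : List String :=
  if target = "" then []
  else
    let lowered := PySem.Str.strip (PySem.Str.lower target)
    if lowered = "all" then available_ids
    else
      match legacyAliases.get? lowered with
      | some items => items.filter (fun item => available_ids.contains item)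
      | none =>
        -- target.split(","): the separator is the nonempty literal ",", so split? is always `some`
        let raw_parts := (((PySem.Str.split? target ",").getD []).map PySem.Str.strip).filter (fun p => ¬ p = "")
        let normalized := raw_parts.foldl (fun acc part =>
          let part_lower := PySem.Str.lower part
          match legacyAliases.get? part_lower with
          | some items => acc ++ items.filter (fun item => available_ids.contains item)
          | none => if available_ids.contains part_lower then acc ++ [part_lower] else acc) []
        PySem.List.dedup normalized

-- ===== PORT B =====
def expand_targets_alt (target : String) (available_ids : List String) : List String :=
  if target = "" then []
  else if PySem.Str.strip (PySem.Str.lower target) = "all" then available_ids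
  else
    -- flat expansion comprehension over the comma tokens
    let cand := (((PySem.Str.split? target ",").getD []).filter
        (fun part => ¬ PySem.Str.strip part = "")).flatMap
        (fun part => (legacyAliases.get? (PySem.Str.lower (PySem.Str.strip part))).getD
          [PySem.Str.lower (PySem.Str.strip part)])
    -- wanted = set(cand) & set(available_ids); result = sorted(wanted, key=cand.index)
    -- (cand.index never raises here: every element of wanted is in cand; the key is
    -- injective on wanted, so the sort does not depend on Python's set iteration order)
    let wanted := PySem.Set.inter (PySem.Set.ofList cand) (PySem.Set.ofList available_ids)
    PySem.List.sorted wanted (fun c => (PySem.List.index? cand c).getD 0) false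

-- ===== PRECONDITION & SPEC =====
def Spec_expand_targets (target : String) (available_ids : List String) (out : List String) : Prop := out = expand_targets_alt target available_ids
instance (target : String) (available_ids : List String) (out : List String) : Decidable (Spec_expand_targets target available_ids out) := by unfold Spec_expand_targets; infer_instance

-- ===== CLAIM (what is proved, stated in full; the proofs are below) =====
def Claim_equal_expand_targets : Prop := ∀ (target : String) (available_ids : List String), Dom_expand_targets target available_ids → Spec_expand_targets target available_ids (expand_targets target available_ids)

-- ===== LEMMAS AND PROOFS =====

-- proof-side views of the two per-token expansions
def pvTok (part : String) : List String :=
  let token := PySem.Str.lower (PySem.Str.strip part)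
  if token = "" then [] else (legacyAliases.get? token).getD [token]

def pvGA (avail : List String) (part : String) : List String :=
  let part_lower := PySem.Str.lower part
  match legacyAliases.get? part_lower with
  | some items => items.filter (fun item => avail.contains item)
  | none => if avail.contains part_lower then [part_lower] else []

theorem splitOn_go_no_comma : ∀ (fuel : Nat) (l cur : List Char) (acc : List (List Char)), (',' ∉ l) → l.length ≤ fuel →
    PySem.Chars.splitOn.go [','] fuel l cur acc = ((cur.reverse ++ l) :: acc).reverse := by
  intro fuel
  induction fuel with
  | zero => intro l cur acc h hl; simp at hl; subst hl; simp [PySem.Chars.splitOn.go]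
  | succ f ih =>
    intro l cur acc h hl
    cases l with
    | nil => simp [PySem.Chars.splitOn.go]
    | cons c rest =>
      have hc : ¬ (c = ',') := fun e => h (by simp [e])
      rw [PySem.Chars.splitOn.go]
      have hpre : [','].isPrefixOf (c :: rest) = false := by
        simp [List.isPrefixOf]; exact fun e => hc e.symm
      rw [hpre]
      simp only [Bool.false_eq_true, if_false]
      rw [ih rest (c :: cur) acc (fun m => h (List.mem_cons_of_mem _ m)) (by simpa using Nat.le_of_succ_le_succ (by simpa using hl))]
      simp

theorem splitOn_no_comma (s : List Char) (h : ',' ∉ s) : PySem.Chars.splitOn s [','] = [s] := by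
  unfold PySem.Chars.splitOn
  rw [splitOn_go_no_comma (s.length + 1) s [] [] h (by omega)]
  simp

theorem isspace_lowerChar (c : Char) : PySem.Chars.isspace (PySem.Chars.lowerChar c) = PySem.Chars.isspace c := by
  unfold PySem.Chars.lowerChar
  split
  · rename_i h
    unfold PySem.Chars.isupper at h
    simp at h
    obtain ⟨h1, h2⟩ := h
    have h1' : 65 ≤ c.toNat := h1
    have h2' : c.toNat ≤ 90 := h2
    have hv : Nat.isValidChar (c.toNat + 32) := Or.inl (by omega)
    have ht : (Char.ofNat (c.toNat + 32)).toNat = c.toNat + 32 := by simp [Char.ofNat, hv]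
    have lhs : PySem.Chars.isspace (Char.ofNat (c.toNat + 32)) = false := by
      simp only [PySem.Chars.isspace, ht, Bool.or_eq_false_iff, Bool.and_eq_false_iff,
        decide_eq_false_iff_not]
      omega
    have rhs : PySem.Chars.isspace c = false := by
      simp only [PySem.Chars.isspace, Bool.or_eq_false_iff, Bool.and_eq_false_iff,
        decide_eq_false_iff_not]
      omega
    rw [lhs, rhs]
  · rfl

theorem strip_lower_comm (l : List Char) :
    PySem.Chars.strip (PySem.Chars.lower l) = PySem.Chars.lower (PySem.Chars.strip l) := by
  have hcomp : (PySem.Chars.isspace ∘ PySem.Chars.lowerChar) = PySem.Chars.isspace :=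
    funext isspace_lowerChar
  simp only [PySem.Chars.strip, PySem.Chars.lstrip, PySem.Chars.rstrip, PySem.Chars.lower]
  rw [List.dropWhile_map, hcomp, ← List.map_reverse, List.dropWhile_map, hcomp, List.map_reverse]

theorem mem_strip_of_not_isspace {c : Char} {l : List Char} (hc : PySem.Chars.isspace c = false)
    (h : c ∈ l) : c ∈ PySem.Chars.strip l := by
  have key : ∀ (m : List Char), c ∈ m → c ∈ m.dropWhile PySem.Chars.isspace := by
    intro m hm
    induction m with
    | nil => cases hm
    | cons a t ih =>
      by_cases ha : PySem.Chars.isspace a = true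
      · rw [List.dropWhile_cons_of_pos ha]
        rcases List.mem_cons.mp hm with rfl | ht
        · rw [hc] at ha; cases ha
        · exact ih ht
      · rw [List.dropWhile_cons_of_neg ha]; exact hm
  simp only [PySem.Chars.strip, PySem.Chars.lstrip, PySem.Chars.rstrip]
  rw [List.mem_reverse]
  exact key _ (by rw [List.mem_reverse]; exact key _ h)

theorem lower_eq_empty_iff (s : String) : PySem.Str.lower s = "" ↔ s = "" := by
  constructor
  · intro h
    have h2 : PySem.Chars.lower s.toList = [] := by
      have := congrArg String.toList h
      simpa using this
    have h3 : s.toList = [] := List.map_eq_nil_iff.mp h2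
    exact String.toList_eq_nil_iff.mp h3
  · intro h; subst h; rfl

theorem flatMap_filter_eq {α β : Type} (l : List α) (p : α → Bool) (g : α → List β) :
    (l.filter p).flatMap g = l.flatMap (fun x => if p x then g x else []) := by
  induction l with
  | nil => rfl
  | cons a t ih =>
    by_cases h : p a = true
    · simp [h, ih]
    · simp [h, ih]

-- set(xs) commutes with filtering
theorem ofList_filter_comm {α : Type} [BEq α] [LawfulBEq α] (p : α → Bool) (l : List α) :
    (PySem.Set.ofList l).filter p = PySem.Set.ofList (l.filter p) := by
  induction l with
  | nil => rfl
  | cons c t ih =>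
    rw [PySem.Set.ofList_cons]
    by_cases hc : p c = true
    · rw [List.filter_cons_of_pos hc, List.filter_cons_of_pos hc, PySem.Set.ofList_cons, ← ih]
      unfold PySem.Set.discard
      rw [List.filter_filter, List.filter_filter]
      congr 1
      apply List.filter_congr
      intro x _
      rw [Bool.and_comm]
    · rw [List.filter_cons_of_neg hc, List.filter_cons_of_neg hc, ← ih]
      unfold PySem.Set.discard
      rw [List.filter_filter]
      apply List.filter_congr
      intro x _
      by_cases hx : p x = true
      · have hne : (x == c) = false := by
          apply beq_eq_false_iff_ne.mpr
          intro e; subst e; rw [hx] at hc; exact hc rfl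
        rw [hx, hne]; rfl
      · have hx' : p x = false := by revert hx; cases p x <;> simp
        rw [hx']; simp

-- first indices strictly increase along set(cand)
theorem pairwise_idx {α : Type} [BEq α] [LawfulBEq α] (cand : List α) :
    (PySem.Set.ofList cand).Pairwise
      (fun a b => (PySem.List.index? cand a).getD 0 < (PySem.List.index? cand b).getD 0) := by
  induction cand with
  | nil => exact List.Pairwise.nil
  | cons c t ih =>
    rw [PySem.Set.ofList_cons]
    apply List.Pairwise.cons
    · intro b hb
      obtain ⟨hbmem, hbne⟩ := (PySem.Set.mem_discard _ _ _).mp hb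
      have hbt : b ∈ t := (PySem.Set.mem_ofList _ _).mp hbmem
      rw [PySem.List.index?_cons_self, PySem.List.index?_cons_of_ne t (fun e => hbne e.symm)]
      obtain ⟨k, hk⟩ := Option.isSome_iff_exists.mp ((PySem.List.index?_isSome_iff t b).mpr hbt)
      rw [hk]
      simp
    · have hsub : (PySem.Set.ofList t).discard c |>.Sublist (PySem.Set.ofList t) :=
        List.filter_sublist
      refine List.Pairwise.imp_of_mem ?_ (List.Pairwise.sublist hsub ih)
      intro a b ha hb hab
      have hane : a ≠ c := ((PySem.Set.mem_discard _ _ _).mp ha).2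
      have hbne : b ≠ c := ((PySem.Set.mem_discard _ _ _).mp hb).2
      have hat : a ∈ t := (PySem.Set.mem_ofList _ _).mp ((PySem.Set.mem_discard _ _ _).mp ha).1
      have hbt : b ∈ t := (PySem.Set.mem_ofList _ _).mp ((PySem.Set.mem_discard _ _ _).mp hb).1
      obtain ⟨ka, hka⟩ := Option.isSome_iff_exists.mp ((PySem.List.index?_isSome_iff t a).mpr hat)
      obtain ⟨kb, hkb⟩ := Option.isSome_iff_exists.mp ((PySem.List.index?_isSome_iff t b).mpr hbt)
      rw [hka, hkb] at hab
      rw [PySem.List.index?_cons_of_ne t (fun e => hane e.symm),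
          PySem.List.index?_cons_of_ne t (fun e => hbne e.symm), hka, hkb]
      simp only [Option.getD_some, Option.map_some] at hab ⊢
      omega

-- B reduced to: dedup of (all candidates, filtered by availability)
theorem alt_shape (target : String) (avail : List String) (h0 : ¬ target = "")
    (h1 : ¬ PySem.Str.strip (PySem.Str.lower target) = "all") :
    expand_targets_alt target avail =
      PySem.Set.ofList ((((PySem.Str.split? target ",").getD []).flatMap pvTok).filter
        (fun c => avail.contains c)) := by
  unfold expand_targets_alt
  rw [if_neg h0, if_neg h1]
  dsimp only
  have hcand : (((PySem.Str.split? target ",").getD []).filter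
        (fun part => ¬ PySem.Str.strip part = "")).flatMap
        (fun part => (legacyAliases.get? (PySem.Str.lower (PySem.Str.strip part))).getD
          [PySem.Str.lower (PySem.Str.strip part)])
      = ((PySem.Str.split? target ",").getD []).flatMap pvTok := by
    rw [flatMap_filter_eq]
    apply List.flatMap_congr
    intro p _
    by_cases hp : PySem.Str.strip p = ""
    · have ht : PySem.Str.lower (PySem.Str.strip p) = "" := by rw [hp]; rfl
      have hz : pvTok p = [] := by unfold pvTok; dsimp only; rw [if_pos ht]
      simp [hz, hp]
    · have ht : ¬ PySem.Str.lower (PySem.Str.strip p) = "" := fun e => hp ((lower_eq_empty_iff _).mp e)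
      have hz : pvTok p = (legacyAliases.get? (PySem.Str.lower (PySem.Str.strip p))).getD [PySem.Str.lower (PySem.Str.strip p)] := by
        unfold pvTok; dsimp only; rw [if_neg ht]
      simp [hz, hp]
  rw [hcand]
  set cand := ((PySem.Str.split? target ",").getD []).flatMap pvTok with hc
  have hinter : PySem.Set.inter (PySem.Set.ofList cand) (PySem.Set.ofList avail)
      = PySem.Set.ofList (cand.filter (fun c => avail.contains c)) := by
    unfold PySem.Set.inter
    rw [← ofList_filter_comm]
    apply List.filter_congr
    intro x _
    rcases hm : PySem.Set.contains (PySem.Set.ofList avail) x with _ | _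
    · have : x ∉ avail := fun h => by
        rw [(PySem.Set.contains_iff _ _).mpr ((PySem.Set.mem_ofList _ _).mpr h)] at hm
        cases hm
      simp [this]
    · have : x ∈ avail := (PySem.Set.mem_ofList _ _).mp ((PySem.Set.contains_iff _ _).mp hm)
      simp [this]
  rw [hinter]
  apply PySem.List.sorted_eq_of_perm_of_pairwise_lt _ _ _ (List.Perm.refl _)
  rw [← ofList_filter_comm]
  exact List.Pairwise.sublist List.filter_sublist (pairwise_idx cand)

-- A's last branch reduced to: dedup of the per-part filtered expansions
theorem a_shape (target : String) (avail : List String) (h0 : ¬ target = "")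
    (h1 : ¬ PySem.Str.strip (PySem.Str.lower target) = "all")
    (hm : legacyAliases.get? (PySem.Str.strip (PySem.Str.lower target)) = none) :
    expand_targets target avail =
      PySem.Set.ofList (((((PySem.Str.split? target ",").getD []).map PySem.Str.strip).filter
        (fun p => ¬ p = "")).flatMap (pvGA avail)) := by
  unfold expand_targets
  rw [if_neg h0]
  dsimp only
  rw [if_neg h1, hm]
  dsimp only
  have hstep : (fun (acc : List String) part =>
      let part_lower := PySem.Str.lower part
      match legacyAliases.get? part_lower with
      | some items => acc ++ items.filter (fun item => avail.contains item)
      | none => if avail.contains part_lower then acc ++ [part_lower] else acc)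
      = (fun (acc : List String) part => acc ++ pvGA avail part) := by
    funext acc part
    unfold pvGA
    dsimp only
    rcases hg : legacyAliases.get? (PySem.Str.lower part) with _ | items
    · by_cases hc : PySem.Str.lower part ∈ avail <;> simp [hc]
    · simp
  rw [hstep, PySem.List.foldl_append_eq_flatMap, List.nil_append, PySem.List.dedup_eq_ofList]

-- the two dedup arguments are the same list
theorem lists_eq (avail : List String) (parts : List String) :
    ((parts.flatMap pvTok).filter (fun c => avail.contains c)) =
      (((parts.map PySem.Str.strip).filter (fun p => ¬ p = "")).flatMap (pvGA avail)) := by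
  rw [List.filter_flatMap, flatMap_filter_eq, List.flatMap_map]
  apply List.flatMap_congr
  intro p _
  by_cases hp : PySem.Str.strip p = ""
  · have ht : PySem.Str.lower (PySem.Str.strip p) = "" := by rw [hp]; rfl
    have hz : pvTok p = [] := by unfold pvTok; dsimp only; rw [if_pos ht]
    simp [hz, hp]
  · have ht : ¬ PySem.Str.lower (PySem.Str.strip p) = "" := fun e => hp ((lower_eq_empty_iff _).mp e)
    simp only [hp, not_false_iff, decide_true, if_true]
    unfold pvTok pvGA
    dsimp only
    rw [if_neg ht]
    rcases hg : legacyAliases.get? (PySem.Str.lower (PySem.Str.strip p)) with _ | items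
    · simp only [Option.getD_none]
      by_cases hc : PySem.Str.lower (PySem.Str.strip p) ∈ avail <;> simp [hc]
    · simp

-- what being an alias key implies: key is nonempty, comma-free, and its value has no duplicates
theorem alias_cases (s : String) (v : List String) (h : legacyAliases.get? s = some v) :
    (',' ∉ s.toList) ∧ ¬ s = "" ∧ v.Nodup := by
  have e : legacyAliases = PySem.Dict.mk
    [("cfo", ["finance"]), ("cto", ["technical"]), ("legal", ["legal_compliance"]),
     ("procurement", ["procurement"]), ("ops", ["operations"]),
     ("cto_cfo", ["technical", "finance"]),
     ("legal_procurement", ["legal_compliance", "procurement"])] := by rfl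
  rw [e] at h
  simp only [PySem.Dict.get?_mk_cons, beq_iff_eq] at h
  split_ifs at h with h1 h2 h3 h4 h5 h6 h7
  · subst h1; exact ⟨by decide, by decide, by injection h with h'; rw [← h']; decide⟩
  · subst h2; exact ⟨by decide, by decide, by injection h with h'; rw [← h']; decide⟩
  · subst h3; exact ⟨by decide, by decide, by injection h with h'; rw [← h']; decide⟩
  · subst h4; exact ⟨by decide, by decide, by injection h with h'; rw [← h']; decide⟩
  · subst h5; exact ⟨by decide, by decide, by injection h with h'; rw [← h']; decide⟩
  · subst h6; exact ⟨by decide, by decide, by injection h with h'; rw [← h']; decide⟩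
  · subst h7; exact ⟨by decide, by decide, by injection h with h'; rw [← h']; decide⟩
  · exact absurd h (by simp [PySem.Dict.get?])

-- ===== VERDICT (by name: the statement is the Claim_ definition above) =====
theorem expand_targets_spec : Claim_equal_expand_targets := by
  intro target available_ids _dom
  unfold Spec_expand_targets
  by_cases h0 : target = ""
  · simp [expand_targets, expand_targets_alt, h0]
  · by_cases h1 : PySem.Str.strip (PySem.Str.lower target) = "all"
    · simp [expand_targets, expand_targets_alt, h0, h1]
    · rcases hm : legacyAliases.get? (PySem.Str.strip (PySem.Str.lower target)) with _ | v
      · -- no whole-string alias: both sides dedup the same filtered expansion list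
        rw [a_shape target available_ids h0 h1 hm, alt_shape target available_ids h0 h1, lists_eq]
      · -- whole-string alias: target has no comma, so B sees the single token = lowered
        obtain ⟨hcomma, hne, hnodup⟩ := alias_cases _ _ hm
        have hcommat : ',' ∉ target.toList := by
          intro hc
          apply hcomma
          have h1m : ',' ∈ PySem.Chars.lower target.toList :=
            List.mem_map.mpr ⟨',', hc, by decide⟩
          have h2m : ',' ∈ PySem.Chars.strip (PySem.Chars.lower target.toList) :=
            mem_strip_of_not_isspace (by decide) h1m
          simpa only [PySem.Str.toList_strip, PySem.Str.toList_lower] using h2m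
        have hsplit : PySem.Str.split? target "," = some [target] := by
          unfold PySem.Str.split?
          rw [show (",").toList = [','] from rfl]
          rw [show PySem.Chars.split? target.toList [','] = some (PySem.Chars.splitOn target.toList [',']) from by simp [PySem.Chars.split?]]
          rw [splitOn_no_comma _ hcommat]
          simp [String.ofList_toList]
        have htok : PySem.Str.lower (PySem.Str.strip target) = PySem.Str.strip (PySem.Str.lower target) := by
          apply String.toList_inj.mp
          simp only [PySem.Str.toList_lower, PySem.Str.toList_strip]
          exact (strip_lower_comm _).symm
        have hB : expand_targets_alt target available_ids =
            PySem.Set.ofList (v.filter (fun c => available_ids.contains c)) := by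
          rw [alt_shape target available_ids h0 h1, hsplit]
          simp only [Option.getD_some, List.flatMap_cons, List.flatMap_nil, List.append_nil]
          unfold pvTok
          dsimp only
          rw [htok, if_neg hne, hm]
          rfl
        have hA : expand_targets target available_ids = v.filter (fun item => available_ids.contains item) := by
          unfold expand_targets
          rw [if_neg h0]
          dsimp only
          rw [if_neg h1, hm]
        rw [hA, hB, PySem.Set.ofList_eq_self_of_nodup _ (List.Nodup.filter _ hnodup)]
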